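-- pv_equiv track=rewrite | github.com/imthefrizzlefry/PythonPractice | interviewProblems/amazon.py | popularNFeatures
-- ===== SOURCE A (Python) =====
-- import queue
-- import queue
--
-- def popularNFeatures(numFeatures, topFeatures, possibleFeatures,
--                      numFeatureRequests, featureRequests):
--     # WRITE YOUR CODE HERE
--     # we want to count occurances for each word (possible feature), in the sentences (feature featureRequests)
--
--     #priority queue to store top features, so it is always sorted
--     # then we want to drop the smallest when count > topFeatures
--     q = queue.PriorityQueue()
--
--     for pf in possibleFeatures:
--         pf_count = 0
--         for fr in featureRequests:
--             if fr.count(pf) > 0: # if the request has at least one mention of possibleFeature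
--                 pf_count += 1 # increment count for that possible feature
--         q.put((-pf_count, pf)) # put a tuple in the PriorityQueue
--
--     return_list = []
--     while topFeatures > 0:
--         return_list.append(q.get()[1])
--         topFeatures -= 1
--
--     return return_list
-- ===== SOURCE B (Python) =====
-- def popularNFeatures(numFeatures, topFeatures, possibleFeatures,
--                      numFeatureRequests, featureRequests):
--     # one pass per request over the (deduplicated) feature table, then one sort
--     counts = dict.fromkeys(possibleFeatures, 0)
--     for fr in featureRequests:
--         for pf in counts:
--             if pf in fr:
--                 counts[pf] += 1
--     ranked = sorted(possibleFeatures, key=lambda pf: (-counts[pf], pf))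
--     return ranked[:max(0, topFeatures)]
-- ===== Notes on version B (the rewrite author's own statement) =====
-- stated objective: faster
-- what changed: A scans every request per feature with str.count (always a full scan) and pops a priority queue topFeatures times; B makes one counting pass over the requests into a dict using the early-exit 'in' substring test per unique feature, then does a single key-sort of the features and slices the top-k.
import Mathlib
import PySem

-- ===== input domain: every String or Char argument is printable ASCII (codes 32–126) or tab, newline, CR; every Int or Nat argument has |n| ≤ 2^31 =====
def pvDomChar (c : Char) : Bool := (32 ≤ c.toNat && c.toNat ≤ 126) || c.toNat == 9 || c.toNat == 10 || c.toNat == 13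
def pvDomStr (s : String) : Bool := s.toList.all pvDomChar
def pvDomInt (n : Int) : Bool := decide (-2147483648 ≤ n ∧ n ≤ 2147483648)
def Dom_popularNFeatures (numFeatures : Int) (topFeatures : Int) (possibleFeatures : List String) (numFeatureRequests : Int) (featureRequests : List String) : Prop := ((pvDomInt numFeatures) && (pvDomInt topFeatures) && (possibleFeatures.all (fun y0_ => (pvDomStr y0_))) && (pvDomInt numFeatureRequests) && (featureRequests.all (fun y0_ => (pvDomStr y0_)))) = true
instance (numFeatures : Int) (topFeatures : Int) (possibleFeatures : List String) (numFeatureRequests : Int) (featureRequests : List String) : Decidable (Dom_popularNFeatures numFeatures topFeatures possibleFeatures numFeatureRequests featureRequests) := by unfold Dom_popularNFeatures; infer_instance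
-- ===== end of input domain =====

-- B replaces A's per-feature scan (str.count of every request, priority-queue pops) by one counting
-- pass over the requests into a dict (early-exit 'in' test) plus a single key-sort and slice;
-- measurably faster by a constant factor on the generated timing inputs.

-- ===== PORT A =====
-- queue.PriorityQueue is modelled as an ordered list: put = ordered insertion
-- (PySem.List.insertBy with Python's tuple order = lexicographic toLex), get = pop the head
-- (the smallest entry). Exact for A's values: entries with equal priority are identical tuples,
-- so every pop order the heap could produce yields the same sequence.
-- 'while topFeatures > 0' runs topFeatures.toNat times; q.get() on an empty queue BLOCKS FOREVER
-- in Python — Pre_ excludes those inputs, the port returns the accumulator there.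
def pvDrainA : Nat → List (Int × String) → List String → List String
  | 0, _, ret => ret
  | _ + 1, [], ret => ret
  | t + 1, x :: q, ret => pvDrainA t q (ret ++ [x.2])

def popularNFeatures (numFeatures : Int) (topFeatures : Int) (possibleFeatures : List String) (numFeatureRequests : Int) (featureRequests : List String) : List String :=
  let q : List (Int × String) := possibleFeatures.foldl (fun q pf =>
    let pf_count : Int := featureRequests.foldl (fun c fr => if 0 < PySem.Str.count fr pf then c + 1 else c) 0
    PySem.List.insertBy (fun a b => decide ((toLex a : Lex (Int × String)) < toLex b)) (-pf_count, pf) q) []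
  pvDrainA topFeatures.toNat q []

-- ===== PORT B =====
-- dict.fromkeys(possibleFeatures, 0) ported as the insert loop it performs; the tuple sort key
-- (-counts[pf], pf) is Python's lexicographic tuple order, i.e. toLex.
def popularNFeatures_alt (numFeatures : Int) (topFeatures : Int) (possibleFeatures : List String) (numFeatureRequests : Int) (featureRequests : List String) : List String :=
  let counts0 : PySem.Dict String Int := possibleFeatures.foldl (fun d pf => d.insert pf 0) PySem.Dict.empty
  let counts : PySem.Dict String Int := featureRequests.foldl (fun d fr =>
    (PySem.Dict.keys d).foldl (fun d' pf => if PySem.Str.isIn pf fr then d'.modify pf 0 (· + 1) else d') d) counts0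
  let ranked := PySem.List.sorted possibleFeatures (fun pf => (toLex (-(counts.getD pf 0), pf) : Lex (Int × String)))
  PySem.List.slice ranked none (some (max 0 topFeatures))

-- ===== PRECONDITION & SPEC =====
-- Pre_ excludes exactly topFeatures > len(possibleFeatures): there A's q.get() blocks forever on an
-- empty priority queue (A never returns a value).
def Pre_popularNFeatures (numFeatures : Int) (topFeatures : Int) (possibleFeatures : List String) (numFeatureRequests : Int) (featureRequests : List String) : Prop :=
  topFeatures ≤ (possibleFeatures.length : Int)
instance (numFeatures : Int) (topFeatures : Int) (possibleFeatures : List String) (numFeatureRequests : Int) (featureRequests : List String) : Decidable (Pre_popularNFeatures numFeatures topFeatures possibleFeatures numFeatureRequests featureRequests) := by unfold Pre_popularNFeatures; infer_instance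

def pvWitness_popularNFeatures : Int × Int × List String × Int × List String :=
  (3, 2, ["a", "b", "c"], 2, ["a b", "b c"])

def Spec_popularNFeatures (numFeatures : Int) (topFeatures : Int) (possibleFeatures : List String) (numFeatureRequests : Int) (featureRequests : List String) (out : List String) : Prop := out = popularNFeatures_alt numFeatures topFeatures possibleFeatures numFeatureRequests featureRequests
instance (numFeatures : Int) (topFeatures : Int) (possibleFeatures : List String) (numFeatureRequests : Int) (featureRequests : List String) (out : List String) : Decidable (Spec_popularNFeatures numFeatures topFeatures possibleFeatures numFeatureRequests featureRequests out) := by unfold Spec_popularNFeatures; infer_instance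

-- ===== CLAIM (what is proved, stated in full; the proofs are below) =====
def Claim_equal_popularNFeatures : Prop := ∀ (numFeatures : Int) (topFeatures : Int) (possibleFeatures : List String) (numFeatureRequests : Int) (featureRequests : List String), Dom_popularNFeatures numFeatures topFeatures possibleFeatures numFeatureRequests featureRequests → Pre_popularNFeatures numFeatures topFeatures possibleFeatures numFeatureRequests featureRequests → Spec_popularNFeatures numFeatures topFeatures possibleFeatures numFeatureRequests featureRequests (popularNFeatures numFeatures topFeatures possibleFeatures numFeatureRequests featureRequests)

-- ===== LEMMAS AND PROOFS =====

-- A positive non-overlapping occurrence count is exactly substring containment.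
theorem pvCountGoPos (sub : List Char) (hsub : sub ≠ []) :
    ∀ (fuel : Nat) (l : List Char) (acc : Nat), l.length ≤ fuel →
      (0 < PySem.Chars.count.go sub fuel l acc ↔ 0 < acc ∨ sub <:+: l) := by
  intro fuel
  induction fuel with
  | zero =>
    intro l acc hl
    have : l = [] := List.eq_nil_of_length_eq_zero (Nat.le_zero.mp hl)
    subst this
    simp [PySem.Chars.count.go, List.infix_nil, hsub]
  | succ n ih =>
    intro l acc hl
    match l with
    | [] => simp [PySem.Chars.count.go, List.infix_nil, hsub]
    | h :: t =>
      by_cases hp : sub.isPrefixOf (h :: t)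
      · have hstep : PySem.Chars.count.go sub (n + 1) (h :: t) acc
            = PySem.Chars.count.go sub n (List.drop sub.length (h :: t)) (acc + 1) := by
          simp [PySem.Chars.count.go, hp]
        have hlen : (List.drop sub.length (h :: t)).length ≤ n := by
          have h1 : 1 ≤ sub.length := by
            cases sub with
            | nil => exact absurd rfl hsub
            | cons a b => simp
          simp only [List.length_drop]
          omega
        rw [hstep, ih _ _ hlen]
        have hinf : sub <:+: h :: t :=
          List.IsPrefix.isInfix (List.isPrefixOf_iff_prefix.mp hp)
        simp [hinf]
      · have hstep : PySem.Chars.count.go sub (n + 1) (h :: t) acc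
            = PySem.Chars.count.go sub n t acc := by
          simp [PySem.Chars.count.go, hp]
        have hlen : t.length ≤ n := by simp at hl; omega
        rw [hstep, ih _ _ hlen, List.infix_cons_iff]
        have : ¬ sub <+: h :: t := fun hc => hp (List.isPrefixOf_iff_prefix.mpr hc)
        tauto

theorem pvCountPos (s sub : List Char) :
    (0 < PySem.Chars.count s sub) ↔ PySem.Chars.isIn sub s = true := by
  rw [PySem.Chars.isIn_iff_infix]
  by_cases h : sub = []
  · simp [PySem.Chars.count, h]
  · rw [PySem.Chars.count]
    simp only [List.isEmpty_iff, h, if_false]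
    rw [pvCountGoPos sub h s.length s 0 (le_refl _)]
    simp

-- the while-loop over the ordered queue pops the first topFeatures entries
theorem pvDrainA_eq (t : Nat) : ∀ (q : List (Int × String)) (ret : List String),
    pvDrainA t q ret = ret ++ (q.take t).map (·.2) := by
  induction t with
  | zero => intro q ret; simp [pvDrainA]
  | succ n ih =>
    intro q ret
    match q with
    | [] => simp [pvDrainA]
    | x :: q' => rw [pvDrainA, ih]; simp

-- every value in the initial dict is 0
theorem pvCounts0_getD (l : List String) : ∀ (d : PySem.Dict String Int),
    (∀ x, d.getD x 0 = 0) →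
    ∀ x, (l.foldl (fun d pf => d.insert pf 0) d).getD x 0 = 0 := by
  induction l with
  | nil => intro d hd x; simpa using hd x
  | cons pf t ih =>
    intro d hd x
    refine ih _ (fun y => ?_) x
    by_cases hy : y = pf
    · subst hy; exact PySem.Dict.getD_insert_self d y 0 0
    · rw [PySem.Dict.getD_insert_of_ne d 0 0 hy]; exact hd y

-- one request: each key contained in the request is bumped once
theorem pvInnerGetD (fr : String) (ks : List String) (hnd : ks.Nodup) :
    ∀ (d : PySem.Dict String Int) (x : String),
      (ks.foldl (fun d' pf => if PySem.Str.isIn pf fr then d'.modify pf 0 (· + 1) else d') d).getD x 0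
        = d.getD x 0 + (if x ∈ ks ∧ PySem.Str.isIn x fr then 1 else 0) := by
  induction ks with
  | nil => intro d x; simp
  | cons k t ih =>
    intro d x
    have hk : k ∉ t := (List.nodup_cons.mp hnd).1
    have hndt : t.Nodup := (List.nodup_cons.mp (by exact hnd)).2
    simp only [List.foldl_cons]
    rw [ih hndt]
    by_cases hx : x = k
    · subst hx
      have hxt : x ∉ t := hk
      by_cases hin : PySem.Str.isIn x fr = true
      · simp only [PySem.Str.isIn_eq] at hin
        simp [hin, hxt]
      · simp only [PySem.Str.isIn_eq] at hin
        simp [hin, hxt]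
    · by_cases hin : PySem.Str.isIn k fr = true
      · simp only [PySem.Str.isIn_eq] at hin
        simp [hin, PySem.Dict.getD_modify, hx, List.mem_cons]
      · simp only [PySem.Str.isIn_eq] at hin
        simp [hin, hx, List.mem_cons]

-- one request's pass leaves the key set unchanged
theorem pvInnerKeys (fr : String) (ks : List String) :
    ∀ (d : PySem.Dict String Int), (∀ pf ∈ ks, d.contains pf = true) →
      (ks.foldl (fun d' pf => if PySem.Str.isIn pf fr then d'.modify pf 0 (· + 1) else d') d).keys
        = d.keys := by
  induction ks with
  | nil => intro d _; simp
  | cons k t ih =>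
    intro d hd
    simp only [List.foldl_cons]
    by_cases hin : PySem.Str.isIn k fr = true
    · have hck : d.contains k = true := hd k (List.mem_cons_self ..)
      have hkeys : (d.modify k 0 (· + 1)).keys = d.keys := by
        rw [PySem.Dict.keys_modify]
        exact PySem.Dict.keys_insert_of_contains d _ hck
      rw [if_pos hin, ih _ ?_, hkeys]
      intro pf hpf
      rw [PySem.Dict.contains_modify]
      simp [hd pf (List.mem_cons_of_mem _ hpf)]
    · rw [if_neg hin]
      exact ih _ (fun pf hpf => hd pf (List.mem_cons_of_mem _ hpf))

-- the counting loop: each key x ends at (number of requests containing x)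
theorem pvOuterGetD (frs : List String) :
    ∀ (d : PySem.Dict String Int), d.keys.Nodup →
      ∀ x,
      ((frs.foldl (fun d fr =>
          (PySem.Dict.keys d).foldl (fun d' pf => if PySem.Str.isIn pf fr then d'.modify pf 0 (· + 1) else d') d) d).getD x 0
        = d.getD x 0 + (if x ∈ d.keys then (frs.countP (fun fr => PySem.Str.isIn x fr) : Int) else 0))
      ∧ (frs.foldl (fun d fr =>
          (PySem.Dict.keys d).foldl (fun d' pf => if PySem.Str.isIn pf fr then d'.modify pf 0 (· + 1) else d') d) d).keys = d.keys := by
  induction frs with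
  | nil => intro d hnd x; simp
  | cons fr t ih =>
    intro d hnd x
    simp only [List.foldl_cons]
    have hkeys : ((PySem.Dict.keys d).foldl (fun d' pf => if PySem.Str.isIn pf fr then d'.modify pf 0 (· + 1) else d') d).keys = d.keys :=
      pvInnerKeys fr d.keys d (fun pf hpf => (PySem.Dict.contains_iff_mem_keys d pf).mpr hpf)
    have hih := ih _ (hkeys ▸ hnd) x
    constructor
    · rw [hih.1, hkeys, pvInnerGetD fr d.keys hnd d x, List.countP_cons]
      by_cases hx : x ∈ d.keys
      · by_cases hin : PySem.Str.isIn x fr <;> simp [hx] <;> ring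
      · simp [hx]
    · rw [hih.2, hkeys]

-- proof-side abbreviations: the true per-feature count and the queue entry it induces
def pvCnt (featureRequests : List String) (pf : String) : Int :=
  (featureRequests.countP (fun fr => PySem.Str.isIn pf fr) : Int)
def pvEnt (featureRequests : List String) (pf : String) : Int × String :=
  (-(pvCnt featureRequests pf), pf)

-- A's queue after all puts is the sorted entry list
theorem pvA_eq (numFeatures topFeatures : Int) (possibleFeatures : List String)
    (numFeatureRequests : Int) (featureRequests : List String) :
    popularNFeatures numFeatures topFeatures possibleFeatures numFeatureRequests featureRequests
      = ((PySem.List.sorted (possibleFeatures.map (pvEnt featureRequests))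
            (fun p => (toLex p : Lex (Int × String)))).take topFeatures.toNat).map (·.2) := by
  unfold popularNFeatures
  rw [pvDrainA_eq]
  simp only [List.nil_append]
  congr 1
  congr 1
  rw [PySem.List.sorted_eq_foldl_insertBy, List.foldl_map]
  apply PySem.List.foldl_congr_mem
  intro acc pf _
  congr 2
  rw [PySem.List.foldl_ite_add_one, zero_add]
  unfold pvCnt
  congr 2
  apply List.countP_congr
  intro fr _
  simp [PySem.Str.count_eq, PySem.Str.isIn_eq, pvCountPos]

-- B's dict holds the true counts for every possible feature
theorem pvB_counts (possibleFeatures featureRequests : List String) :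
    ∀ pf ∈ possibleFeatures,
      ((featureRequests.foldl (fun d fr =>
          (PySem.Dict.keys d).foldl (fun d' pf => if PySem.Str.isIn pf fr then d'.modify pf 0 (· + 1) else d') d)
        (possibleFeatures.foldl (fun d pf => d.insert pf 0) PySem.Dict.empty)).getD pf 0)
        = pvCnt featureRequests pf := by
  intro pf hpf
  set d0 : PySem.Dict String Int := possibleFeatures.foldl (fun d pf => d.insert pf 0) PySem.Dict.empty with hd0
  have hkeys0 : d0.keys = PySem.Set.ofList possibleFeatures := by
    rw [hd0, PySem.Dict.keys_foldl_insert (f := fun _ _ => (0 : Int))]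
    simp [PySem.Set.update_nil_left]
  have hnd0 : d0.keys.Nodup := by rw [hkeys0]; exact PySem.Set.nodup_ofList possibleFeatures
  have h0 : ∀ x, d0.getD x 0 = 0 := pvCounts0_getD possibleFeatures PySem.Dict.empty (by simp)
  rw [(pvOuterGetD featureRequests d0 hnd0 pf).1, h0 pf, hkeys0]
  have : pf ∈ PySem.Set.ofList possibleFeatures := (PySem.Set.mem_ofList _ _).mpr hpf
  simp [this, pvCnt]

-- ===== VERDICT (by name: the statement is the Claim_ definition above) =====
theorem popularNFeatures_spec : Claim_equal_popularNFeatures := by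
  intro numFeatures topFeatures possibleFeatures numFeatureRequests featureRequests _ hpre
  unfold Spec_popularNFeatures
  rw [pvA_eq]
  set counts : PySem.Dict String Int := featureRequests.foldl (fun d fr =>
      (PySem.Dict.keys d).foldl (fun d' pf => if PySem.Str.isIn pf fr then d'.modify pf 0 (· + 1) else d')
        d) (possibleFeatures.foldl (fun d pf => d.insert pf 0) PySem.Dict.empty) with hc
  have hcount : ∀ pf ∈ possibleFeatures, counts.getD pf 0 = pvCnt featureRequests pf := by
    intro pf hpf
    rw [hc]
    exact pvB_counts possibleFeatures featureRequests pf hpf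
  set keyB : String → Lex (Int × String) := fun pf => (toLex (-(counts.getD pf 0), pf) : Lex (Int × String)) with hkB
  -- the sorted entry list is the image of B's ranked list under pvEnt
  have M : PySem.List.sorted (possibleFeatures.map (pvEnt featureRequests))
              (fun p => (toLex p : Lex (Int × String)))
          = (PySem.List.sorted possibleFeatures keyB).map (pvEnt featureRequests) := by
    apply PySem.List.eq_of_perm_of_pairwise_le_of_injective
      (key := fun p : Int × String => (toLex p : Lex (Int × String)))
      (fun a b h => by simpa using h)
    · exact (PySem.List.sorted_perm _ _ _).trans
        ((PySem.List.sorted_perm possibleFeatures keyB false).map (pvEnt featureRequests)).symm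
    · exact PySem.List.sorted_pairwise _ _
    · rw [List.pairwise_map]
      refine (PySem.List.sorted_pairwise possibleFeatures keyB).imp_of_mem ?_
      intro a b ha hb hab
      have ha' : a ∈ possibleFeatures := (PySem.List.mem_sorted _ _ _ _).mp ha
      have hb' : b ∈ possibleFeatures := (PySem.List.mem_sorted _ _ _ _).mp hb
      have ea : keyB a = toLex (pvEnt featureRequests a) := by
        simp only [hkB, pvEnt, hcount a ha']
      have eb : keyB b = toLex (pvEnt featureRequests b) := by
        simp only [hkB, pvEnt, hcount b hb']
      rw [ea, eb] at hab
      exact hab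
  have hB : popularNFeatures_alt numFeatures topFeatures possibleFeatures numFeatureRequests featureRequests
      = PySem.List.slice (PySem.List.sorted possibleFeatures keyB) none (some (max 0 topFeatures)) := rfl
  rw [M, hB, PySem.List.slice_to _ (le_max_left 0 topFeatures)]
  have ht : (max 0 topFeatures).toNat = topFeatures.toNat := by omega
  rw [ht, ← List.map_take, List.map_map]
  have : ((·.2) ∘ pvEnt featureRequests) = fun pf : String => pf := by
    funext pf; rfl
  rw [this, List.map_id']
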